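-- pv_equiv track=rewrite | github.com/Halbert-Nascimento/IESGO-LTP1 | unidade_A/atividade_04_exercicio_12.py | halbert
-- ===== SOURCE A (Python) =====
-- def halbert(texto):
--     texto = texto.lower()
--     contador_letras = 0
--     # modo 1
--     for char in texto:
--         if char == 'h' or char == 'a'or char == 'l'or char == 'b'or char == 'e'or char == 'r'or char == 't':
--             contador_letras +=1
--
--     # modo 2
--     nome = 'halbert'
--     contador_letras_modo2 = 0
--     for char in texto:
--         comparar = char
--         for char2 in nome:
--             if comparar == char2:
--                 contador_letras_modo2 +=1
--
--
--
--     return contador_letras_modo2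
-- ===== SOURCE B (Python) =====
-- def halbert(texto):
--     texto = texto.lower()
--     counts = {}
--     for ch in texto:
--         counts[ch] = counts.get(ch, 0) + 1
--     return sum(counts.get(ch, 0) for ch in 'halbert')
-- ===== Notes on version B (the rewrite author's own statement) =====
-- stated objective: idiomatic
-- what changed: Replaces A's per-character scan against each of the seven target letters (and its redundant first counting loop) with a single histogram-building pass over the text followed by a fixed seven-term sum over the target letters.
import Mathlib
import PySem

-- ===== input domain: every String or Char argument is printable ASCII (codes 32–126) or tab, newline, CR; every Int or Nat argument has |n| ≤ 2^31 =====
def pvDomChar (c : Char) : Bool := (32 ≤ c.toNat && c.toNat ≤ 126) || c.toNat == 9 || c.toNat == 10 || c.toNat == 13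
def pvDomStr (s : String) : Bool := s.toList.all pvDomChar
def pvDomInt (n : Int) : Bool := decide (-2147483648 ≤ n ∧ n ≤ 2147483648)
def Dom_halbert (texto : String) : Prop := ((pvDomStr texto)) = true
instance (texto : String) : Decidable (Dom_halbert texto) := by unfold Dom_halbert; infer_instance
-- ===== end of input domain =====

-- B replaces A's per-character scan over the name with one histogram pass plus a fixed seven-term sum (idiomatic).

-- ===== PORT A =====
def halbert (texto : String) : Int :=
  let t := (PySem.Str.lower texto).toList
  -- modo 1 (computed and discarded, as in A)
  let _contador_letras : Int := t.foldl (fun acc char =>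
    if char == 'h' || char == 'a' || char == 'l' || char == 'b' || char == 'e' || char == 'r' || char == 't'
    then acc + 1 else acc) 0
  -- modo 2
  let nome := "halbert".toList
  let contador_letras_modo2 : Int := t.foldl (fun acc char =>
    nome.foldl (fun a char2 => if char == char2 then a + 1 else a) acc) 0
  contador_letras_modo2

-- ===== PORT B =====
def halbert_alt (texto : String) : Int :=
  let t := (PySem.Str.lower texto).toList
  let counts : PySem.Dict Char Int := t.foldl (fun d ch => d.insert ch (d.getD ch 0 + 1)) PySem.Dict.empty
  ("halbert".toList.map (fun ch => counts.getD ch 0)).sum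

-- ===== PRECONDITION & SPEC =====
def Spec_halbert (texto : String) (out : Int) : Prop := out = halbert_alt texto
instance (texto : String) (out : Int) : Decidable (Spec_halbert texto out) := by unfold Spec_halbert; infer_instance

-- ===== CLAIM (what is proved, stated in full; the proofs are below) =====
def Claim_equal_halbert : Prop := ∀ (texto : String), Dom_halbert texto → Spec_halbert texto (halbert texto)

-- ===== LEMMAS AND PROOFS =====

-- the inner loop of modo 2 adds the number of occurrences of `c` in `n`
theorem pvInnerLoop (n : List Char) (c : Char) (a : Int) :
    n.foldl (fun a c2 => if c == c2 then a + 1 else a) a = a + (n.count c : Int) := by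
  rw [PySem.List.foldl_if_add_one (fun c2 => c == c2)]
  congr 1
  simp only [List.count]
  exact_mod_cast congrArg Nat.cast (List.countP_congr (fun x _ => by simp only [beq_iff_eq]; exact eq_comm))

-- double-counting swap: summing counts of s's elements in n = summing counts of n's elements in s
theorem pvSwap (s n : List Char) :
    (s.map (fun c => (n.count c : Int))).sum = (n.map (fun c => (s.count c : Int))).sum := by
  induction s with
  | nil => simp
  | cons a s ih =>
    simp only [List.map_cons, List.sum_cons, ih, List.count_cons]
    have hmap : (n.map fun c => ((s.count c + if a == c then 1 else 0 : Nat) : Int))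
        = n.map (fun c => (s.count c : Int) + (if a == c then (1:Int) else 0)) := by
      apply List.map_congr_left
      intro c _
      push_cast
      split_ifs <;> simp
    rw [hmap, List.sum_map_add]
    have hcnt : (n.map fun c => (if a == c then (1:Int) else 0)).sum = (n.count a : Int) := by
      rw [PySem.List.sum_map_ite_one_zero]
      simp only [List.count]
      exact_mod_cast congrArg Nat.cast (List.countP_congr (fun x _ => by simp only [beq_iff_eq]; exact eq_comm))
    rw [hcnt]
    ring

-- ===== VERDICT (by name: the statement is the Claim_ definition above) =====
theorem halbert_spec : Claim_equal_halbert := by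
  intro texto _
  unfold Spec_halbert halbert halbert_alt
  simp only [pvInnerLoop, PySem.List.foldl_add, PySem.Dict.getD_foldl_insert_add_one, zero_add]
  have hemp : ∀ ch : Char, (PySem.Dict.empty : PySem.Dict Char Int).getD ch 0 = 0 := fun _ => rfl
  simp only [hemp, zero_add]
  exact pvSwap _ _
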